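-- pv_equiv track=rewrite | github.com/sholpan4/Python_classwork | Dop/05.py | ridge_case
-- ===== SOURCE A (Python) =====
-- def ridge_case(name):
--     result = ""
--     index = 0
--     for char in name:
--         if index % 2 == 0:
--             result += char.upper()
--         else:
--             result += char.lower()
--         if char != " " and char != "_":
--             index += 1
--     return result
-- ===== SOURCE B (Python) =====
-- def ridge_case(name):
--     letters = [c for c in name if c != " " and c != "_"]
--     transformed = [c.upper() if i % 2 == 0 else c.lower() for i, c in enumerate(letters)]
--     it = iter(transformed)
--     return "".join(c if c == " " or c == "_" else next(it) for c in name)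
-- ===== Notes on version B (the rewrite author's own statement) =====
-- stated objective: alternative
-- what changed: Replaces A's single fused pass with a per-character parity counter by a filter/transform/reinsert decomposition: extract the non-space/underscore subsequence, alternate-case it by its own enumerate index, then walk the original string reinserting separators and consuming the transformed characters.
import Mathlib
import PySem

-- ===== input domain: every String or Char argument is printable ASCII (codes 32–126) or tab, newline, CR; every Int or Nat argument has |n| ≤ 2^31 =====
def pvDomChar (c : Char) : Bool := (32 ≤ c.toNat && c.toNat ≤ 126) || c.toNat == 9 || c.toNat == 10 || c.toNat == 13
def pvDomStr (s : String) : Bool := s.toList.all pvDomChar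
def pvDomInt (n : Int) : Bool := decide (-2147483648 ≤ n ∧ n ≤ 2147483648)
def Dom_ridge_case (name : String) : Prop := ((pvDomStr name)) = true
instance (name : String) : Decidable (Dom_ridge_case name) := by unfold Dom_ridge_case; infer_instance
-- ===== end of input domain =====

-- B rebuilds the string from a filtered subsequence (filter → alternate-case map → reinsert), replacing A's fused single pass with a counter; objective: alternative decomposition, same cost.

-- ===== PORT A =====
-- A: one pass, accumulator (result, index); index counts only non-space/underscore chars.
def ridge_case (name : String) : String :=
  let st := name.toList.foldl
    (fun (st : List Char × Nat) c =>
      let result := st.1 ++ [if st.2 % 2 == 0 then PySem.Chars.upperChar c else PySem.Chars.lowerChar c]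
      let index := if c ≠ ' ' ∧ c ≠ '_' then st.2 + 1 else st.2
      (result, index))
    ([], 0)
  String.mk st.1

-- ===== PORT B =====
-- B helper: walk the original string, keeping spaces/underscores, consuming transformed chars otherwise.
-- (the [] inner case is unreachable: transformed has one element per non-skip char)
def pvReinsert : List Char → List Char → List Char
  | [], _ => []
  | c :: cs, ts =>
    if c == ' ' || c == '_' then c :: pvReinsert cs ts
    else match ts with
      | t :: ts' => t :: pvReinsert cs ts'
      | [] => pvReinsert cs []

def ridge_case_alt (name : String) : String :=
  let letters := name.toList.filter (fun c => c ≠ ' ' && c ≠ '_')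
  let transformed := (PySem.List.enumerate letters 0).map
    (fun p => if p.1 % 2 == 0 then PySem.Chars.upperChar p.2 else PySem.Chars.lowerChar p.2)
  String.mk (pvReinsert name.toList transformed)

-- ===== PRECONDITION & SPEC =====
def Spec_ridge_case (name : String) (out : String) : Prop := out = ridge_case_alt name
instance (name : String) (out : String) : Decidable (Spec_ridge_case name out) := by unfold Spec_ridge_case; infer_instance

-- ===== CLAIM (what is proved, stated in full; the proofs are below) =====
def Claim_equal_ridge_case : Prop := ∀ (name : String), Dom_ridge_case name → Spec_ridge_case name (ridge_case name)

-- ===== LEMMAS AND PROOFS =====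

-- structural version of A's loop output
def pvGoA : Nat → List Char → List Char
  | _, [] => []
  | i, c :: cs =>
    (if i % 2 == 0 then PySem.Chars.upperChar c else PySem.Chars.lowerChar c)
      :: pvGoA (if c ≠ ' ' ∧ c ≠ '_' then i + 1 else i) cs

-- alternating-case transform starting at parity index i
def pvTf : Nat → List Char → List Char
  | _, [] => []
  | i, c :: cs =>
    (if i % 2 == 0 then PySem.Chars.upperChar c else PySem.Chars.lowerChar c) :: pvTf (i + 1) cs

theorem pvFoldA (cs : List Char) (acc : List Char) (i : Nat) :
    (cs.foldl
      (fun (st : List Char × Nat) c =>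
        (st.1 ++ [if st.2 % 2 == 0 then PySem.Chars.upperChar c else PySem.Chars.lowerChar c],
          if c ≠ ' ' ∧ c ≠ '_' then st.2 + 1 else st.2))
      (acc, i)).1 = acc ++ pvGoA i cs := by
  induction cs generalizing acc i with
  | nil => simp [pvGoA]
  | cons c cs ih =>
    rw [List.foldl_cons]
    exact (ih (acc ++ [if i % 2 == 0 then PySem.Chars.upperChar c else PySem.Chars.lowerChar c])
        (if c ≠ ' ' ∧ c ≠ '_' then i + 1 else i)).trans
      (by simp [pvGoA, List.append_assoc])

theorem pvEnumMap (ls : List Char) (n : Nat) :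
    ((PySem.List.enumerate ls (n : Int)).map
      (fun p => if p.1 % 2 == 0 then PySem.Chars.upperChar p.2 else PySem.Chars.lowerChar p.2))
      = pvTf n ls := by
  induction ls generalizing n with
  | nil => simp [PySem.List.enumerate_nil, pvTf]
  | cons c cs ih =>
    rw [PySem.List.enumerate_cons, List.map_cons]
    show (if ((n : Int) % 2 == 0) then PySem.Chars.upperChar c else PySem.Chars.lowerChar c)
        :: _ = _
    rw [show (n : Int) + 1 = ((n + 1 : Nat) : Int) by push_cast; ring, ih]
    have hdvd : (2 ∣ (n : Int)) ↔ n % 2 = 0 := by omega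
    simp [pvTf, hdvd]

theorem pvEnumMap0 (ls : List Char) :
    ((PySem.List.enumerate ls 0).map
      (fun p => if p.1 % 2 == 0 then PySem.Chars.upperChar p.2 else PySem.Chars.lowerChar p.2))
      = pvTf 0 ls := by
  have := pvEnumMap ls 0
  simpa using this

theorem pvMain (cs : List Char) (i : Nat) :
    pvReinsert cs (pvTf i (cs.filter (fun c => c ≠ ' ' && c ≠ '_'))) = pvGoA i cs := by
  induction cs generalizing i with
  | nil => simp [pvReinsert, pvGoA]
  | cons c cs ih =>
    by_cases hsp : c = ' '
    · subst hsp
      simp [pvReinsert, pvGoA]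
      exact ⟨by split <;> decide, by simpa using ih i⟩
    · by_cases hus : c = '_'
      · subst hus
        simp [pvReinsert, pvGoA]
        exact ⟨by split <;> decide, by simpa using ih i⟩
      · have hne : (c == ' ' || c == '_') = false := by simp [hsp, hus]
        simp [hsp, hus, pvTf, pvReinsert, hne, pvGoA]
        simpa using ih (i + 1)

-- ===== VERDICT (by name: the statement is the Claim_ definition above) =====
theorem ridge_case_spec : Claim_equal_ridge_case := by
  intro name _
  show String.mk (name.toList.foldl
      (fun (st : List Char × Nat) c =>
        (st.1 ++ [if st.2 % 2 == 0 then PySem.Chars.upperChar c else PySem.Chars.lowerChar c],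
          if c ≠ ' ' ∧ c ≠ '_' then st.2 + 1 else st.2))
      ([], 0)).1
    = String.mk (pvReinsert name.toList
        ((PySem.List.enumerate (name.toList.filter (fun c => c ≠ ' ' && c ≠ '_')) 0).map
          (fun p => if p.1 % 2 == 0 then PySem.Chars.upperChar p.2 else PySem.Chars.lowerChar p.2)))
  rw [pvFoldA, pvEnumMap0, pvMain, List.nil_append]
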